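-- pv_equiv track=rewrite | github.com/carlosmorenobarrado/tft-guias | scripts/cluster_by_traits.py | find_dominant_trait
-- ===== SOURCE A (Python) =====
-- UNIQUE_TRAITS = {
--     "TFT16_Harvester",      # Fiddlesticks
--     "TFT16_KindredUnique",  # Kindred
--     "TFT16_Soulbound",      # Lucian (Kindred) - pareja única
--     "TFT16_ShyvanaUnique",  # Shyvana
--     "TFT16_DarkChild",      # Annie
--     "TFT16_SylasTrait",     # Sylas
--     "TFT16_Glutton",        # Tahm Kench
--     "TFT16_TheBoss",        # Sett
--     "TFT16_Eternal",        # Kindred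
--     "TFT16_Blacksmith",     # Ornn
--     "TFT16_Emperor",        # Azir
--     "TFT16_Chronokeeper",   # Zilean
--     "TFT16_Dragonborn",     # Shyvana
--     "TFT16_Heroic",         # Braum
--     "TFT16_HexMech",        # Rumble+Tristana
--     "TFT16_StarForger",     # Aurelion Sol
--     "TFT16_Riftscourge",    # Baron Nashor
--     "TFT16_WorldEnder",     # Aatrox
--     "TFT16_Chainbreaker",   # Sylas
--     "TFT16_RuneMage",       # Ryze
--     "TFT16_Huntress",       # Diana
--     "TFT16_Assimilator",    # Kayn
--     "TFT16_Ascendant",      # Xerath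
--     "TFT16_Caretaker",      # Maokai
--     "TFT16_Immortal",       # Fiddlesticks
--     "TFT16_Teamup_SingedTeemo",  # Team-up
-- }
--
-- def find_dominant_trait(comp_data, champions_by_trait):
--     """
--     Encuentra el trait dominante de una comp usando top_traits.
--     Excluye traits únicos y busca el trait con más unidades
--     que tenga campeones en múltiples costes.
--     """
--     top_traits = comp_data.get("top_traits", [])
--
--     for trait_tuple in top_traits:
--         trait = trait_tuple[0]  # El apiName del trait
--
--         # Saltar traits únicos
--         if trait in UNIQUE_TRAITS or "Unique" in trait:
--             continue
--
--         # Verificar que el trait tenga campeones en diferentes costes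
--         trait_champs = champions_by_trait.get(trait, [])
--         if not trait_champs:
--             continue
--
--         costs = set(c["coste"] for c in trait_champs)
--
--         # Preferir traits con campeones en al menos 2 rangos de coste
--         if len(costs) >= 2:
--             trait_display = trait.replace("TFT16_", "")
--             return trait, trait_display
--
--     # Fallback: usar el primer trait no-único
--     for trait_tuple in top_traits:
--         trait = trait_tuple[0]
--         if trait not in UNIQUE_TRAITS and "Unique" not in trait:
--             trait_display = trait.replace("TFT16_", "")
--             return trait, trait_display
--
--     return None, None
-- ===== SOURCE B (Python) =====
-- UNIQUE_TRAITS = {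
--     "TFT16_Harvester", "TFT16_KindredUnique", "TFT16_Soulbound",
--     "TFT16_ShyvanaUnique", "TFT16_DarkChild", "TFT16_SylasTrait",
--     "TFT16_Glutton", "TFT16_TheBoss", "TFT16_Eternal", "TFT16_Blacksmith",
--     "TFT16_Emperor", "TFT16_Chronokeeper", "TFT16_Dragonborn",
--     "TFT16_Heroic", "TFT16_HexMech", "TFT16_StarForger",
--     "TFT16_Riftscourge", "TFT16_WorldEnder", "TFT16_Chainbreaker",
--     "TFT16_RuneMage", "TFT16_Huntress", "TFT16_Assimilator",
--     "TFT16_Ascendant", "TFT16_Caretaker", "TFT16_Immortal",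
--     "TFT16_Teamup_SingedTeemo",
-- }
--
--
-- def find_dominant_trait(comp_data, champions_by_trait):
--     """Single pass: return the first non-unique trait spanning >= 2 costs,
--     remembering the first non-unique trait as a fallback."""
--     fallback = None
--     for trait_tuple in comp_data.get("top_traits", []):
--         trait = trait_tuple[0]
--         if trait in UNIQUE_TRAITS or "Unique" in trait:
--             continue
--         if fallback is None:
--             fallback = trait
--         costs = {c["coste"] for c in champions_by_trait.get(trait, [])}
--         if len(costs) >= 2:
--             return trait, trait.replace("TFT16_", "")
--     if fallback is None:
--         return None, None
--     return fallback, fallback.replace("TFT16_", "")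
-- ===== Notes on version B (the rewrite author's own statement) =====
-- stated objective: simpler
-- what changed: A scans top_traits twice (one loop for a multi-cost trait, a second full loop for the fallback); B makes a single pass that remembers the first non-unique trait as the fallback and returns a multi-cost trait immediately, so the second scan disappears.
import Mathlib
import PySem

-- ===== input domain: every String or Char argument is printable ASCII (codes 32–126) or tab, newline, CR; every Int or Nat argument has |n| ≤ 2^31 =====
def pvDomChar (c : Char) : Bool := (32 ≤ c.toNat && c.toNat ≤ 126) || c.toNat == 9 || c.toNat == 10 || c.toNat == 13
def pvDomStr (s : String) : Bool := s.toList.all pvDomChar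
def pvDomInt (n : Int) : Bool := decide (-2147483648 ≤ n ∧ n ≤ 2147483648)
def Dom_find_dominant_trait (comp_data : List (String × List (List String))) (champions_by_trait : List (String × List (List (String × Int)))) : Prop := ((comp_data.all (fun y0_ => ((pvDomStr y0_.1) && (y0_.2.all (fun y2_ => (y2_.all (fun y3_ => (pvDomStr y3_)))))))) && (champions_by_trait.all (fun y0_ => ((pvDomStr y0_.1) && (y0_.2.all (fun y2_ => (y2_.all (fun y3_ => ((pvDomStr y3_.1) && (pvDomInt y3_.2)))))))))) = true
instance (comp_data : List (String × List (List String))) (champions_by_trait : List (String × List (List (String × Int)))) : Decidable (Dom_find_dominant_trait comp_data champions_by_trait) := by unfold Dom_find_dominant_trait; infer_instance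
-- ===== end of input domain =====

-- B replaces A's two scans of top_traits (multi-cost search, then a second fallback scan)
-- by one pass that remembers the first non-unique trait as the fallback; objective: simpler.

-- ===== PORT A =====
def pvUniqueTraits : List String :=
  ["TFT16_Harvester", "TFT16_KindredUnique", "TFT16_Soulbound",
   "TFT16_ShyvanaUnique", "TFT16_DarkChild", "TFT16_SylasTrait",
   "TFT16_Glutton", "TFT16_TheBoss", "TFT16_Eternal", "TFT16_Blacksmith",
   "TFT16_Emperor", "TFT16_Chronokeeper", "TFT16_Dragonborn",
   "TFT16_Heroic", "TFT16_HexMech", "TFT16_StarForger",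
   "TFT16_Riftscourge", "TFT16_WorldEnder", "TFT16_Chainbreaker",
   "TFT16_RuneMage", "TFT16_Huntress", "TFT16_Assimilator",
   "TFT16_Ascendant", "TFT16_Caretaker", "TFT16_Immortal",
   "TFT16_Teamup_SingedTeemo"]

-- 'trait in UNIQUE_TRAITS or "Unique" in trait'
def pvSkip (t : String) : Bool := pvUniqueTraits.contains t || PySem.Str.isIn "Unique" t

-- A's first loop; trait_tuple[0] is totalised as headD "" (exact under Pre_: tuples nonempty)
def pvLoop1 (cbt : List (String × List (List (String × Int)))) :
    List (List String) → Option (Option String × Option String)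
  | [] => none
  | tt :: rest =>
    let trait := tt.headD ""
    if pvSkip trait then pvLoop1 cbt rest
    else
      let trait_champs := PySem.Dict.getD (PySem.Dict.mk cbt) trait []
      if trait_champs.isEmpty then pvLoop1 cbt rest
      else
        -- c["coste"] totalised as getD _ "coste" 0 (exact under Pre_: key present)
        let costs := PySem.Set.ofList (trait_champs.map (fun c => PySem.Dict.getD (PySem.Dict.mk c) "coste" 0))
        if 2 ≤ costs.length then some (some trait, some (PySem.Str.replace trait "TFT16_" ""))
        else pvLoop1 cbt rest

-- A's second (fallback) loop
def pvLoop2 : List (List String) → Option String × Option String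
  | [] => (none, none)
  | tt :: rest =>
    let trait := tt.headD ""
    if !pvSkip trait then (some trait, some (PySem.Str.replace trait "TFT16_" ""))
    else pvLoop2 rest

def find_dominant_trait (comp_data : List (String × List (List String))) (champions_by_trait : List (String × List (List (String × Int)))) : Option String × Option String :=
  let top_traits := PySem.Dict.getD (PySem.Dict.mk comp_data) "top_traits" []
  match pvLoop1 champions_by_trait top_traits with
  | some r => r
  | none => pvLoop2 top_traits

-- ===== PORT B =====
-- single pass carrying the fallback (first non-unique trait seen, set once)
def pvLoopB (cbt : List (String × List (List (String × Int)))) :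
    List (List String) → Option String → Option String × Option String
  | [], fb =>
    match fb with
    | some t => (some t, some (PySem.Str.replace t "TFT16_" ""))
    | none => (none, none)
  | tt :: rest, fb =>
    let trait := tt.headD ""
    if pvSkip trait then pvLoopB cbt rest fb
    else
      let fb' := match fb with | none => some trait | some t => some t
      let costs := PySem.Set.ofList
        ((PySem.Dict.getD (PySem.Dict.mk cbt) trait []).map (fun c => PySem.Dict.getD (PySem.Dict.mk c) "coste" 0))
      if 2 ≤ costs.length then (some trait, some (PySem.Str.replace trait "TFT16_" ""))
      else pvLoopB cbt rest fb'

def find_dominant_trait_alt (comp_data : List (String × List (List String))) (champions_by_trait : List (String × List (List (String × Int)))) : Option String × Option String :=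
  pvLoopB champions_by_trait (PySem.Dict.getD (PySem.Dict.mk comp_data) "top_traits" []) none

-- ===== PRECONDITION & SPEC =====
-- A raises IndexError on an empty trait tuple and KeyError on a champion record without "coste".
-- Pre_ requires every trait tuple nonempty and, for every non-skipped trait listed in top_traits,
-- that its champion records carry "coste"; A evaluates these lazily, so this slightly narrows
-- (A can return before reaching a malformed later entry; see claim.json cites).
def Pre_find_dominant_trait (comp_data : List (String × List (List String))) (champions_by_trait : List (String × List (List (String × Int)))) : Prop :=
  ((PySem.Dict.getD (PySem.Dict.mk comp_data) "top_traits" []).all (fun tt =>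
     !tt.isEmpty
     && (pvSkip (tt.headD "")
         || (PySem.Dict.getD (PySem.Dict.mk champions_by_trait) (tt.headD "") []).all
              (fun c => PySem.Dict.contains (PySem.Dict.mk c) "coste")))) = true
instance (comp_data : List (String × List (List String))) (champions_by_trait : List (String × List (List (String × Int)))) : Decidable (Pre_find_dominant_trait comp_data champions_by_trait) := by unfold Pre_find_dominant_trait; infer_instance

def pvWitness_find_dominant_trait : (List (String × List (List String))) × (List (String × List (List (String × Int)))) :=
  ([("top_traits", [["TFT16_A"], ["TFT16_B"]])],
   [("TFT16_B", [[("coste", 1)], [("coste", 3)]])])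

def Spec_find_dominant_trait (comp_data : List (String × List (List String))) (champions_by_trait : List (String × List (List (String × Int)))) (out : Option String × Option String) : Prop := out = find_dominant_trait_alt comp_data champions_by_trait
instance (comp_data : List (String × List (List String))) (champions_by_trait : List (String × List (List (String × Int)))) (out : Option String × Option String) : Decidable (Spec_find_dominant_trait comp_data champions_by_trait out) := by unfold Spec_find_dominant_trait; infer_instance

-- ===== CLAIM (what is proved, stated in full; the proofs are below) =====
def Claim_equal_find_dominant_trait : Prop := ∀ (comp_data : List (String × List (List String))) (champions_by_trait : List (String × List (List (String × Int)))), Dom_find_dominant_trait comp_data champions_by_trait → Pre_find_dominant_trait comp_data champions_by_trait → Spec_find_dominant_trait comp_data champions_by_trait (find_dominant_trait comp_data champions_by_trait)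

-- ===== LEMMAS AND PROOFS =====
-- one pass with a fallback = search pass, then fallback pass
theorem pvLoopB_eq (cbt : List (String × List (List (String × Int)))) :
    ∀ (ts : List (List String)) (fb : Option String),
      pvLoopB cbt ts fb =
        match pvLoop1 cbt ts with
        | some r => r
        | none =>
          match fb with
          | some t => (some t, some (PySem.Str.replace t "TFT16_" ""))
          | none => pvLoop2 ts := by
  intro ts
  induction ts with
  | nil => intro fb; cases fb <;> simp [pvLoopB, pvLoop1, pvLoop2]
  | cons tt rest ih =>
    intro fb
    by_cases hs : pvSkip (tt.head?.getD "") = true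
    · simp [pvLoopB, pvLoop1, pvLoop2, hs, ih]
    · by_cases he : (PySem.Dict.getD (PySem.Dict.mk cbt) (tt.head?.getD "") []).isEmpty
      · have hlen : ¬ 2 ≤ (PySem.Set.ofList ((PySem.Dict.getD (PySem.Dict.mk cbt) (tt.head?.getD "") []).map (fun c => PySem.Dict.getD (PySem.Dict.mk c) "coste" 0))).length := by
          rw [List.isEmpty_iff] at he; simp [he, PySem.Set.ofList]
        cases fb <;> simp [pvLoopB, pvLoop1, pvLoop2, hs, he, hlen, ih]
      · by_cases h2 : 2 ≤ (PySem.Set.ofList ((PySem.Dict.getD (PySem.Dict.mk cbt) (tt.head?.getD "") []).map (fun c => PySem.Dict.getD (PySem.Dict.mk c) "coste" 0))).length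
        · simp [pvLoopB, pvLoop1, pvLoop2, hs, he, h2]
        · cases fb <;> simp [pvLoopB, pvLoop1, pvLoop2, hs, he, h2, ih]

-- ===== VERDICT (by name: the statement is the Claim_ definition above) =====
theorem find_dominant_trait_spec : Claim_equal_find_dominant_trait := by
  intro comp_data champions_by_trait _ _
  unfold Spec_find_dominant_trait find_dominant_trait find_dominant_trait_alt
  rw [pvLoopB_eq]
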